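-- pv_equiv track=rewrite | github.com/yangqi0/petitgpt | distill/general_classify_canonicalize_v1.py | guess_explain_subfamily
-- ===== SOURCE A (Python) =====
-- def guess_explain_subfamily(prompt: str) -> str:
--     low = prompt.lower()
--     pairs = {
--         "budget": "explain_budget_simple",
--         "deadline": "explain_deadline_simple",
--         "password manager": "explain_password_manager_simple",
--         "agenda": "explain_meeting_agenda_simple",
--         "reminder": "explain_reminder_simple",
--         "receipt": "explain_receipt_simple",
--         "schedule": "explain_schedule_simple",
--         "feedback": "explain_feedback_simple",
--         "draft": "explain_draft_simple",
--         "subscription": "explain_subscription_simple",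
--         "task list": "explain_task_list_simple",
--         "attachment": "explain_attachment_simple",
--     }
--     if "difference between" in low:
--         if "debit card" in low and "credit card" in low:
--             return "compare_debit_credit_simple"
--         if "receipt" in low and "invoice" in low:
--             return "compare_receipt_invoice_simple"
--         if "note" in low and "report" in low:
--             return "compare_note_report_simple"
--         if "reminder" in low and "alarm" in low:
--             return "compare_reminder_alarm_simple"
--         if "agenda" in low and "notes" in low:
--             return "compare_agenda_notes_simple"
--         if "password" in low and "pin" in low:
--             return "compare_password_pin_simple"
--         if "goal" in low and "deadline" in low:
--             return "compare_goal_deadline_simple"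
--         if "saving" in low and "spending" in low:
--             return "compare_saving_spending_simple"
--     for k, v in pairs.items():
--         if k in low:
--             return v
--     return "explain_budget_simple"
-- ===== SOURCE B (Python) =====
-- # All keywords the classifier can ever look for (distinct).
-- KEYWORDS = [
--     "difference between", "debit card", "credit card", "invoice", "note",
--     "report", "alarm", "notes", "password", "pin", "goal", "saving",
--     "spending", "budget", "deadline", "password manager", "agenda",
--     "reminder", "receipt", "schedule", "feedback", "draft", "subscription",
--     "task list", "attachment",
-- ]
--
-- # Ordered decision rules: first rule whose required keywords were all detected wins.
-- RULES = [
--     ({"difference between", "debit card", "credit card"}, "compare_debit_credit_simple"),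
--     ({"difference between", "receipt", "invoice"}, "compare_receipt_invoice_simple"),
--     ({"difference between", "note", "report"}, "compare_note_report_simple"),
--     ({"difference between", "reminder", "alarm"}, "compare_reminder_alarm_simple"),
--     ({"difference between", "agenda", "notes"}, "compare_agenda_notes_simple"),
--     ({"difference between", "password", "pin"}, "compare_password_pin_simple"),
--     ({"difference between", "goal", "deadline"}, "compare_goal_deadline_simple"),
--     ({"difference between", "saving", "spending"}, "compare_saving_spending_simple"),
--     ({"budget"}, "explain_budget_simple"),
--     ({"deadline"}, "explain_deadline_simple"),
--     ({"password manager"}, "explain_password_manager_simple"),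
--     ({"agenda"}, "explain_meeting_agenda_simple"),
--     ({"reminder"}, "explain_reminder_simple"),
--     ({"receipt"}, "explain_receipt_simple"),
--     ({"schedule"}, "explain_schedule_simple"),
--     ({"feedback"}, "explain_feedback_simple"),
--     ({"draft"}, "explain_draft_simple"),
--     ({"subscription"}, "explain_subscription_simple"),
--     ({"task list"}, "explain_task_list_simple"),
--     ({"attachment"}, "explain_attachment_simple"),
-- ]
--
--
-- def guess_explain_subfamily(prompt: str) -> str:
--     low = prompt.lower()
--     # Stage 1: one sweep over the string, collecting every keyword that starts
--     # at some position (all keywords are non-empty, so this detects occurrence).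
--     hits = set()
--     for i in range(len(low)):
--         for kw in KEYWORDS:
--             if kw not in hits and low.startswith(kw, i):
--                 hits.add(kw)
--     # Stage 2: pure decision on the detected feature set.
--     for need, label in RULES:
--         if need <= hits:
--             return label
--     return "explain_budget_simple"
-- ===== Notes on version B (the rewrite author's own statement) =====
-- stated objective: alternative
-- what changed: Splits classification into a feature-extraction sweep (one pass over the string's positions building the set of keywords that occur) followed by a pure decision stage that returns the first rule whose required keyword-set is a subset of the detected set, instead of A's nested branch tree of per-keyword substring tests with a dict fall-through loop.
import Mathlib
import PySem

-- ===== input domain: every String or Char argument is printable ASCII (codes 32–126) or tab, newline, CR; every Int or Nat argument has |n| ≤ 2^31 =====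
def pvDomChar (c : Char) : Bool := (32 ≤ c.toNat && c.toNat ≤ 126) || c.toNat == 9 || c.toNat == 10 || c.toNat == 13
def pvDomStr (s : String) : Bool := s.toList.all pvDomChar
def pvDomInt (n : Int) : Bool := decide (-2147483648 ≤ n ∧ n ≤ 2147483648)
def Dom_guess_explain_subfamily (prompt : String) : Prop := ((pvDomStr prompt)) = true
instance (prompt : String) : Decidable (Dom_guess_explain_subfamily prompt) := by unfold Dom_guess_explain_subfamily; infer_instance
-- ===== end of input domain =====

-- B splits the task into a one-pass position sweep over the string collecting the set of
-- occurring keywords, then a pure decision stage over that set; A's nested substring-test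
-- branch tree with a dict fall-through loop is replaced (objective: alternative).


-- ===== PORT A =====
-- A's `for k, v in pairs.items(): if k in low: return v` / final `return "explain_budget_simple"`
def pairsLoop (low : String) : List (String × String) → String
  | [] => "explain_budget_simple"
  | (k, v) :: rest => if PySem.Str.isIn k low then v else pairsLoop low rest

def guess_explain_subfamily (prompt : String) : String :=
  let low := PySem.Str.lower prompt
  let pairs : List (String × String) :=
    [("budget", "explain_budget_simple"),
     ("deadline", "explain_deadline_simple"),
     ("password manager", "explain_password_manager_simple"),
     ("agenda", "explain_meeting_agenda_simple"),
     ("reminder", "explain_reminder_simple"),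
     ("receipt", "explain_receipt_simple"),
     ("schedule", "explain_schedule_simple"),
     ("feedback", "explain_feedback_simple"),
     ("draft", "explain_draft_simple"),
     ("subscription", "explain_subscription_simple"),
     ("task list", "explain_task_list_simple"),
     ("attachment", "explain_attachment_simple")]
  if PySem.Str.isIn "difference between" low then
    if PySem.Str.isIn "debit card" low && PySem.Str.isIn "credit card" low then
      "compare_debit_credit_simple"
    else if PySem.Str.isIn "receipt" low && PySem.Str.isIn "invoice" low then
      "compare_receipt_invoice_simple"
    else if PySem.Str.isIn "note" low && PySem.Str.isIn "report" low then
      "compare_note_report_simple"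
    else if PySem.Str.isIn "reminder" low && PySem.Str.isIn "alarm" low then
      "compare_reminder_alarm_simple"
    else if PySem.Str.isIn "agenda" low && PySem.Str.isIn "notes" low then
      "compare_agenda_notes_simple"
    else if PySem.Str.isIn "password" low && PySem.Str.isIn "pin" low then
      "compare_password_pin_simple"
    else if PySem.Str.isIn "goal" low && PySem.Str.isIn "deadline" low then
      "compare_goal_deadline_simple"
    else if PySem.Str.isIn "saving" low && PySem.Str.isIn "spending" low then
      "compare_saving_spending_simple"
    else pairsLoop low pairs
  else pairsLoop low pairs

-- ===== PORT B =====
def bKeywords : List String :=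
  ["difference between", "debit card", "credit card", "invoice", "note",
   "report", "alarm", "notes", "password", "pin", "goal", "saving",
   "spending", "budget", "deadline", "password manager", "agenda",
   "reminder", "receipt", "schedule", "feedback", "draft", "subscription",
   "task list", "attachment"]

def bRules : List (PySem.Set String × String) :=
  [(PySem.Set.ofList ["difference between", "debit card", "credit card"], "compare_debit_credit_simple"),
   (PySem.Set.ofList ["difference between", "receipt", "invoice"], "compare_receipt_invoice_simple"),
   (PySem.Set.ofList ["difference between", "note", "report"], "compare_note_report_simple"),
   (PySem.Set.ofList ["difference between", "reminder", "alarm"], "compare_reminder_alarm_simple"),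
   (PySem.Set.ofList ["difference between", "agenda", "notes"], "compare_agenda_notes_simple"),
   (PySem.Set.ofList ["difference between", "password", "pin"], "compare_password_pin_simple"),
   (PySem.Set.ofList ["difference between", "goal", "deadline"], "compare_goal_deadline_simple"),
   (PySem.Set.ofList ["difference between", "saving", "spending"], "compare_saving_spending_simple"),
   (PySem.Set.ofList ["budget"], "explain_budget_simple"),
   (PySem.Set.ofList ["deadline"], "explain_deadline_simple"),
   (PySem.Set.ofList ["password manager"], "explain_password_manager_simple"),
   (PySem.Set.ofList ["agenda"], "explain_meeting_agenda_simple"),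
   (PySem.Set.ofList ["reminder"], "explain_reminder_simple"),
   (PySem.Set.ofList ["receipt"], "explain_receipt_simple"),
   (PySem.Set.ofList ["schedule"], "explain_schedule_simple"),
   (PySem.Set.ofList ["feedback"], "explain_feedback_simple"),
   (PySem.Set.ofList ["draft"], "explain_draft_simple"),
   (PySem.Set.ofList ["subscription"], "explain_subscription_simple"),
   (PySem.Set.ofList ["task list"], "explain_task_list_simple"),
   (PySem.Set.ofList ["attachment"], "explain_attachment_simple")]

-- inner loop body: `if kw not in hits and low.startswith(kw, i): hits.add(kw)`
-- (low.startswith(kw, i) with 0 ≤ i < len(low) is exactly: kw is a prefix of low[i:])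
def sweepStep (low : List Char) (i : Nat) (hits : PySem.Set String) (kw : String) : PySem.Set String :=
  if !(PySem.Set.contains hits kw) && PySem.Chars.startswith (low.drop i) kw.toList then
    PySem.Set.add hits kw
  else hits

-- `for i in range(len(low)): for kw in KEYWORDS: …`
def detect (low : List Char) : PySem.Set String :=
  (List.range low.length).foldl (fun hits i => bKeywords.foldl (sweepStep low i) hits) PySem.Set.empty

-- `for need, label in RULES: if need <= hits: return label` / final default
def ruleScanB (hits : PySem.Set String) : List (PySem.Set String × String) → String
  | [] => "explain_budget_simple"
  | (need, label) :: rest =>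
      if PySem.Set.issubset need hits then label else ruleScanB hits rest

def guess_explain_subfamily_alt (prompt : String) : String :=
  ruleScanB (detect (PySem.Str.lower prompt).toList) bRules

-- ===== PRECONDITION & SPEC =====
def Spec_guess_explain_subfamily (prompt : String) (out : String) : Prop := out = guess_explain_subfamily_alt prompt
instance (prompt : String) (out : String) : Decidable (Spec_guess_explain_subfamily prompt out) := by unfold Spec_guess_explain_subfamily; infer_instance

-- ===== CLAIM (what is proved, stated in full; the proofs are below) =====
def Claim_equal_guess_explain_subfamily : Prop := ∀ (prompt : String), Dom_guess_explain_subfamily prompt → Spec_guess_explain_subfamily prompt (guess_explain_subfamily prompt)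

-- ===== LEMMAS AND PROOFS =====

-- Membership after the inner keyword loop at one position.
theorem mem_foldl_sweepStep (low : List Char) (i : Nat) (kws : List String)
    (hits : PySem.Set String) (kw : String) :
    kw ∈ kws.foldl (sweepStep low i) hits ↔
      kw ∈ hits ∨ (kw ∈ kws ∧ PySem.Chars.startswith (low.drop i) kw.toList = true) := by
  induction kws generalizing hits with
  | nil => simp
  | cons k rest ih =>
    rw [List.foldl_cons, ih]
    unfold sweepStep
    split_ifs with hg
    · rw [Bool.and_eq_true, Bool.not_eq_true'] at hg
      by_cases hk : kw = k
      · subst hk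
        simp only [PySem.Set.mem_add, List.mem_cons]
        tauto
      · simp only [PySem.Set.mem_add, List.mem_cons, hk]
        tauto
    · simp only [Bool.and_eq_true, Bool.not_eq_true', not_and] at hg
      by_cases hk : kw = k
      · subst hk
        by_cases hcon : PySem.Set.contains hits kw = true
        · have hin : kw ∈ hits := by
            simpa [PySem.Set.contains, List.contains_iff_mem] using hcon
          simp only [List.mem_cons]
          tauto
        · have hsf : PySem.Chars.startswith (low.drop i) kw.toList = false :=
            Bool.not_eq_true _ ▸ hg (Bool.eq_false_iff.mpr hcon)
          simp only [List.mem_cons, hsf]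
          tauto
      · simp only [List.mem_cons, hk]
        tauto

-- Membership after the whole sweep over positions 0 … n-1.
theorem mem_sweep (low : List Char) (n : Nat) (kw : String) :
    kw ∈ (List.range n).foldl (fun hits i => bKeywords.foldl (sweepStep low i) hits) PySem.Set.empty ↔
      kw ∈ bKeywords ∧ ∃ i < n, PySem.Chars.startswith (low.drop i) kw.toList = true := by
  induction n with
  | zero => simp [PySem.Set.empty]
  | succ m ih =>
    rw [List.range_succ, List.foldl_append, List.foldl_cons, List.foldl_nil,
      mem_foldl_sweepStep, ih]
    constructor
    · rintro (⟨hmem, i, hi, hsw⟩ | ⟨hmem, hsw⟩)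
      · exact ⟨hmem, i, Nat.lt_succ_of_lt hi, hsw⟩
      · exact ⟨hmem, m, Nat.lt_succ_self m, hsw⟩
    · rintro ⟨hmem, i, hi, hsw⟩
      rcases Nat.lt_succ_iff_lt_or_eq.mp hi with h | h
      · exact Or.inl ⟨hmem, i, h, hsw⟩
      · exact Or.inr ⟨hmem, h ▸ hsw⟩

-- For every keyword the classifier uses, detection equals substring containment.
theorem contains_detect (low : List Char) (kw : String)
    (hmem : kw ∈ bKeywords) (hne : kw.toList ≠ []) :
    List.contains (detect low) kw = PySem.Chars.isIn kw.toList low := by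
  rw [Bool.eq_iff_iff, List.contains_iff_mem]
  unfold detect
  rw [mem_sweep, ← PySem.Chars.exists_prefix_drop_iff_isIn]
  constructor
  · rintro ⟨-, i, -, hsw⟩
    exact ⟨i, (PySem.Chars.startswith_iff _ _).mp hsw⟩
  · rintro ⟨j, hj⟩
    refine ⟨hmem, ?_⟩
    by_cases hlt : j < low.length
    · exact ⟨j, hlt, (PySem.Chars.startswith_iff _ _).mpr hj⟩
    · exfalso
      rw [List.drop_eq_nil_of_le (Nat.le_of_not_lt hlt)] at hj
      exact hne (List.prefix_nil.mp hj)

-- Every keyword the classifier uses is non-empty.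
theorem bKeywords_ne_nil : ∀ kw ∈ bKeywords, kw.toList ≠ [] := by decide

-- ===== VERDICT (by name: the statement is the Claim_ definition above) =====
theorem guess_explain_subfamily_spec : Claim_equal_guess_explain_subfamily := by
  intro prompt _
  unfold Spec_guess_explain_subfamily guess_explain_subfamily guess_explain_subfamily_alt
  generalize PySem.Str.lower prompt = low
  have hc : ∀ kw ∈ bKeywords, List.contains (detect low.toList) kw = PySem.Str.isIn kw low := by
    intro kw h
    rw [contains_detect low.toList kw h (bKeywords_ne_nil kw h)]
    simp [PySem.Str.isIn_eq]
  have hb : bRules =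
      [(["difference between", "debit card", "credit card"], "compare_debit_credit_simple"),
       (["difference between", "receipt", "invoice"], "compare_receipt_invoice_simple"),
       (["difference between", "note", "report"], "compare_note_report_simple"),
       (["difference between", "reminder", "alarm"], "compare_reminder_alarm_simple"),
       (["difference between", "agenda", "notes"], "compare_agenda_notes_simple"),
       (["difference between", "password", "pin"], "compare_password_pin_simple"),
       (["difference between", "goal", "deadline"], "compare_goal_deadline_simple"),
       (["difference between", "saving", "spending"], "compare_saving_spending_simple"),
       (["budget"], "explain_budget_simple"),
       (["deadline"], "explain_deadline_simple"),
       (["password manager"], "explain_password_manager_simple"),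
       (["agenda"], "explain_meeting_agenda_simple"),
       (["reminder"], "explain_reminder_simple"),
       (["receipt"], "explain_receipt_simple"),
       (["schedule"], "explain_schedule_simple"),
       (["feedback"], "explain_feedback_simple"),
       (["draft"], "explain_draft_simple"),
       (["subscription"], "explain_subscription_simple"),
       (["task list"], "explain_task_list_simple"),
       (["attachment"], "explain_attachment_simple")] := by decide
  rw [hb]
  simp only [ruleScanB, PySem.Set.issubset, PySem.Set.contains, List.all_cons, List.all_nil,
    Bool.and_true]
  rw [hc "difference between" (by decide), hc "debit card" (by decide),
    hc "credit card" (by decide), hc "invoice" (by decide), hc "note" (by decide),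
    hc "report" (by decide), hc "alarm" (by decide), hc "notes" (by decide),
    hc "password" (by decide), hc "pin" (by decide), hc "goal" (by decide),
    hc "saving" (by decide), hc "spending" (by decide), hc "budget" (by decide),
    hc "deadline" (by decide), hc "password manager" (by decide), hc "agenda" (by decide),
    hc "reminder" (by decide), hc "receipt" (by decide), hc "schedule" (by decide),
    hc "feedback" (by decide), hc "draft" (by decide), hc "subscription" (by decide),
    hc "task list" (by decide), hc "attachment" (by decide)]
  by_cases h : PySem.Str.isIn "difference between" low = true
  · simp only [pairsLoop, h, Bool.true_and, if_true]
  · rw [Bool.not_eq_true] at h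
    simp only [pairsLoop, h, Bool.false_and, if_false, Bool.false_eq_true]
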